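-- pv_equiv track=rewrite | github.com/Carrotww/Carrot_Algorithm | Algorithm_Lecture/week_2/homework/3. plus_or_minus.py | pm3
-- ===== SOURCE A (Python) =====
-- import copy
--
-- def pm3(numbers, target):
--     # Recursive_version
--     if not numbers and target == 0:
--         return 1
--     elif not numbers:
--         return 0
--     else:
--         temp_list = copy.deepcopy(numbers)
--         temp = temp_list.pop()
--         return pm3(temp_list, target-temp) + pm3(temp_list, target+temp)
-- ===== SOURCE B (Python) =====
-- def pm3(numbers, target):
--     # DP over a dict of partial-sum counts instead of A's exponential recursion.
--     counts = {0: 1}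
--     for x in numbers:
--         new = {}
--         for s, c in counts.items():
--             new[s + x] = new.get(s + x, 0) + c
--             new[s - x] = new.get(s - x, 0) + c
--         counts = new
--     return counts.get(target, 0)
-- ===== Notes on version B (the rewrite author's own statement) =====
-- stated objective: faster
-- what changed: Replaces A's exponential branching recursion (two recursive calls per element) with a single left-to-right dynamic-programming pass that maintains a dict mapping each reachable partial sum to the number of sign assignments producing it.
import Mathlib
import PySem

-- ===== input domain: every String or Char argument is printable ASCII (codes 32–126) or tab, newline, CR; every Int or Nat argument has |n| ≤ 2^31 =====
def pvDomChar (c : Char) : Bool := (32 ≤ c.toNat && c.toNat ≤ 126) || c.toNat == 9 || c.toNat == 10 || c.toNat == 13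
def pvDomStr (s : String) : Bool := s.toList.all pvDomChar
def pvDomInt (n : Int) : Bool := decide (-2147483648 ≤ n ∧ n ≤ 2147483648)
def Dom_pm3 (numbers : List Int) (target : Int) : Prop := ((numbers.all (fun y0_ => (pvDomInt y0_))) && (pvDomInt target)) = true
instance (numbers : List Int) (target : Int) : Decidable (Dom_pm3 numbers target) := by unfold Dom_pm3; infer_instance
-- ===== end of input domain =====

-- B replaces A's exponential two-way recursion with a dict-based DP over partial-sum counts (asymptotically faster); return values proved equal on all inputs.


-- ===== PORT A =====
-- A: if the list is empty return 1 iff target == 0; otherwise pop the last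
-- element and recurse on target∓temp.
def pm3 (numbers : List Int) (target : Int) : Int :=
  if h : numbers = [] then
    if target = 0 then 1 else 0
  else
    let tempList := numbers.dropLast
    let temp := numbers.getLast h
    pm3 tempList (target - temp) + pm3 tempList (target + temp)
termination_by numbers.length
decreasing_by
  all_goals
    simpa [List.length_dropLast] using Nat.sub_lt (List.length_pos_iff.mpr h) one_pos

-- ===== PORT B =====
-- B (Source B): inner-loop body — new[s+x] = new.get(s+x,0)+c; new[s-x] = new.get(s-x,0)+c
def pm3Ins (x : Int) (new : PySem.Dict Int Int) (sc : Int × Int) : PySem.Dict Int Int :=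
  let new1 := new.insert (sc.1 + x) (new.getD (sc.1 + x) 0 + sc.2)
  new1.insert (sc.1 - x) (new1.getD (sc.1 - x) 0 + sc.2)

-- one step of the DP: rebuild the dict of partial-sum counts from the old one
def pm3Step (x : Int) (counts : PySem.Dict Int Int) : PySem.Dict Int Int :=
  counts.items.foldl (pm3Ins x) PySem.Dict.empty

def pm3_alt (numbers : List Int) (target : Int) : Int :=
  (numbers.foldl (fun counts x => pm3Step x counts)
    (PySem.Dict.empty.insert 0 1)).getD target 0

-- ===== PRECONDITION & SPEC =====
def Spec_pm3 (numbers : List Int) (target : Int) (out : Int) : Prop := out = pm3_alt numbers target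
instance (numbers : List Int) (target : Int) (out : Int) : Decidable (Spec_pm3 numbers target out) := by unfold Spec_pm3; infer_instance

-- ===== CLAIM (what is proved, stated in full; the proofs are below) =====
def Claim_equal_pm3 : Prop := ∀ (numbers : List Int) (target : Int), Dom_pm3 numbers target → Spec_pm3 numbers target (pm3 numbers target)

-- ===== LEMMAS AND PROOFS =====

-- A on a snoc list: pop the last element
theorem pm3_snoc (ns : List Int) (x t : Int) :
    pm3 (ns ++ [x]) t = pm3 ns (t - x) + pm3 ns (t + x) := by
  rw [pm3]
  simp

-- lookup after one inner-loop body
theorem pm3Ins_getD (x : Int) (new : PySem.Dict Int Int) (sc : Int × Int) (t : Int) :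
    (pm3Ins x new sc).getD t 0 =
      new.getD t 0 + ((if sc.1 + x = t then sc.2 else 0) + (if sc.1 - x = t then sc.2 else 0)) := by
  simp only [pm3Ins, PySem.Dict.getD_insert]
  split_ifs <;> subst_vars <;> simp_all <;> omega

theorem pm3Ins_nodup (x : Int) (new : PySem.Dict Int Int) (sc : Int × Int)
    (h : new.keys.Nodup) : (pm3Ins x new sc).keys.Nodup := by
  simp only [pm3Ins]
  exact PySem.Dict.nodup_keys_insert _ _ _ (PySem.Dict.nodup_keys_insert _ _ _ h)

-- lookup after the inner loop, as a sum over the processed items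
theorem foldl_pm3Ins_getD (x t : Int) (l : List (Int × Int)) (d : PySem.Dict Int Int) :
    (l.foldl (pm3Ins x) d).getD t 0 =
      d.getD t 0 +
        (l.map (fun sc => (if sc.1 + x = t then sc.2 else 0) + (if sc.1 - x = t then sc.2 else 0))).sum := by
  induction l generalizing d with
  | nil => simp
  | cons sc l ih =>
    simp only [List.foldl_cons, ih, pm3Ins_getD, List.map_cons, List.sum_cons]
    ring

theorem foldl_pm3Ins_nodup (x : Int) (l : List (Int × Int)) (d : PySem.Dict Int Int)
    (h : d.keys.Nodup) : (l.foldl (pm3Ins x) d).keys.Nodup := by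
  induction l generalizing d with
  | nil => exact h
  | cons sc l ih => exact ih _ (pm3Ins_nodup _ _ _ h)

theorem pm3Step_nodup (x : Int) (c : PySem.Dict Int Int) : (pm3Step x c).keys.Nodup :=
  foldl_pm3Ins_nodup x _ _ PySem.Dict.nodup_keys_empty

-- sum over a nodup list of an indicator picking one key
theorem sum_map_ite_eq (l : List Int) (hnd : l.Nodup) (f : Int → Int) (a : Int) :
    (l.map (fun k => if k = a then f k else 0)).sum = if a ∈ l then f a else 0 := by
  induction l with
  | nil => simp
  | cons k l ih =>
    rcases List.nodup_cons.mp hnd with ⟨hk, hnd'⟩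
    by_cases hka : k = a
    · subst hka
      have hz : (l.map (fun j => if j = k then f j else 0)).sum = 0 := by
        apply List.sum_eq_zero
        intro y hy
        rcases List.mem_map.mp hy with ⟨j, hj, hje⟩
        have : j ≠ k := fun e => hk (e ▸ hj)
        simp [this] at hje
        omega
      simp [hz]
    · have hak : ¬ a = k := fun e => hka e.symm
      simp [if_neg hka, ih hnd', hak]

-- a dict lookup with default 0 equals the guarded keys-membership value
theorem getD_eq_ite_mem (d : PySem.Dict Int Int) (a : Int) :
    (if a ∈ d.keys then d.getD a 0 else 0) = d.getD a 0 := by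
  by_cases h : a ∈ d.keys
  · simp [h]
  · rw [if_neg h, PySem.Dict.getD_of_not_contains]
    rw [PySem.Dict.contains_eq_decide_mem_keys]
    simpa using h

-- one DP step recomputes the counts exactly as popping one more element in A
theorem pm3Step_getD (x t : Int) (c : PySem.Dict Int Int) (h : c.keys.Nodup) :
    (pm3Step x c).getD t 0 = c.getD (t - x) 0 + c.getD (t + x) 0 := by
  rw [pm3Step, foldl_pm3Ins_getD, PySem.Dict.getD_empty,
    PySem.Dict.items_eq_map_keys c h 0, List.map_map]
  have hsplit :
      (c.keys.map ((fun sc : Int × Int => (if sc.1 + x = t then sc.2 else 0) + (if sc.1 - x = t then sc.2 else 0)) ∘ fun k => (k, c.getD k 0))).sum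
        = (c.keys.map (fun k => if k = t - x then c.getD k 0 else 0)).sum
          + (c.keys.map (fun k => if k = t + x then c.getD k 0 else 0)).sum := by
    rw [← List.sum_map_add]
    apply congrArg
    apply List.map_congr_left
    intro k _
    simp only [Function.comp]
    simp only [show (k + x = t) ↔ (k = t - x) by omega,
      show (k - x = t) ↔ (k = t + x) by omega]
  rw [hsplit, sum_map_ite_eq _ h _ _, sum_map_ite_eq _ h _ _,
    getD_eq_ite_mem, getD_eq_ite_mem]
  ring

-- the DP dict keeps distinct keys throughout
theorem run_nodup (ns : List Int) (d : PySem.Dict Int Int) (h : d.keys.Nodup) :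
    (ns.foldl (fun counts x => pm3Step x counts) d).keys.Nodup := by
  induction ns generalizing d with
  | nil => exact h
  | cons x ns ih => exact ih _ (pm3Step_nodup x d)

-- the DP invariant: after folding ns, the dict tabulates A's value at every target
theorem run_getD (ns : List Int) :
    ∀ t : Int,
      (ns.foldl (fun counts x => pm3Step x counts) (PySem.Dict.empty.insert 0 1)).getD t 0
        = pm3 ns t := by
  induction ns using List.reverseRecOn with
  | nil =>
    intro t
    rw [pm3]
    simp only [List.foldl_nil, PySem.Dict.getD_insert, PySem.Dict.getD_empty]
    split_ifs <;> simp_all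
  | append_singleton ns x ih =>
    intro t
    rw [List.foldl_append, List.foldl_cons, List.foldl_nil, pm3_snoc,
      pm3Step_getD _ _ _ (run_nodup ns _ (PySem.Dict.nodup_keys_insert _ _ _ PySem.Dict.nodup_keys_empty)),
      ih, ih]

-- ===== VERDICT (by name: the statement is the Claim_ definition above) =====
theorem pm3_spec : Claim_equal_pm3 := by
  intro numbers target _
  unfold Spec_pm3 pm3_alt
  exact (run_getD numbers target).symm
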